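-- pv_equiv track=rewrite | github.com/Unknow-Error/RitualRoll | Grimorio/Grimorio_FastAPI/HojasPersonajes/mage_CWoD_20.py | contar_quintaesencia_y_paradoja
-- ===== SOURCE A (Python) =====
-- def contar_quintaesencia_y_paradoja(campos):
--     """
--         Función que cuenta los qpcheck points o dots de quintaescencia o paradoja según su uso en la planilla PDF.
--     """
--     quintaesencia = 0
--     paradoja = 0
--
--     checks = [f"qpcheck{i}" for i in range(1, 21)]
--     valores = [campos.get(check, {}).get("valor_actual", "") in {"Ye", "Yes", "On"} for check in checks]
--
--     # Quintessence: cuenta del inicio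
--     for valor in valores:
--         if valor:
--             quintaesencia += 1
--         else:
--             break  # solo cuenta los "Yes" consecutivos desde el principio
--
--     # Paradox: cuenta desde el final
--     for valor in reversed(valores):
--         if valor:
--             paradoja += 1
--         else:
--             break  # solo cuenta los "Yes" consecutivos desde el final
--
--     return {
--         "quintessence_dots": quintaesencia,
--         "paradox_dots": paradoja
--     }
-- ===== SOURCE B (Python) =====
-- def contar_quintaesencia_y_paradoja(campos):
--     """Single-pass state machine: one traversal of the 20 fields maintains the
--     leading run (frozen at the first unchecked dot) and the current trailing
--     run (reset at every unchecked dot); no boolean list, no reversed scan."""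
--     quintaesencia = 0
--     paradoja = 0
--     frozen = False
--     for i in range(1, 21):
--         if campos.get(f"qpcheck{i}", {}).get("valor_actual", "") in {"Ye", "Yes", "On"}:
--             paradoja += 1
--             if not frozen:
--                 quintaesencia += 1
--         else:
--             frozen = True
--             paradoja = 0
--     return {"quintessence_dots": quintaesencia, "paradox_dots": paradoja}
-- ===== Notes on version B (the rewrite author's own statement) =====
-- stated objective: alternative
-- what changed: Replaces A's two staged scans (build a 20-boolean list, scan-until-break from the front, then scan-until-break over the reversed list) with one single forward pass carrying a three-part accumulator (leading count frozen at the first miss, a frozen flag, and a trailing-run counter reset at every miss), building no intermediate list.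
import Mathlib
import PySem

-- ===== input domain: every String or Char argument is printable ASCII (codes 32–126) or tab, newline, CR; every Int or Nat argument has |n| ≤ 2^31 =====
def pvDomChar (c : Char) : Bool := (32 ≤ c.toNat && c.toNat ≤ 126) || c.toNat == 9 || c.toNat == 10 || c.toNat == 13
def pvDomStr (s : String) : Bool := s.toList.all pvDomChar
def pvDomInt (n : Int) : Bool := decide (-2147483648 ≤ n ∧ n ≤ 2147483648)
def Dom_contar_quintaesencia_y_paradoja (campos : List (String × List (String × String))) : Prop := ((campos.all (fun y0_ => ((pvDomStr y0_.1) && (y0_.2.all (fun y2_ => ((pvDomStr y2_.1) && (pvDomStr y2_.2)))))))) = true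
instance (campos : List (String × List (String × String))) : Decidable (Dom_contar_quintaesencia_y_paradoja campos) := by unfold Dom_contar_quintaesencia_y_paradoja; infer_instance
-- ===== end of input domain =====

-- B replaces A's two staged break-scans over a boolean list (and its reversal) with one
-- single forward pass carrying a (leading-count, frozen-flag, trailing-run) accumulator.

-- ===== PORT A =====
-- campos.get(check, {}).get("valor_actual", "") in {"Ye", "Yes", "On"}
def pvChecked (campos : List (String × List (String × String))) (check : String) : Bool :=
  let v := PySem.Dict.getD (PySem.Dict.mk (PySem.Dict.getD (PySem.Dict.mk campos) check ([] : List (String × String)))) "valor_actual" ""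
  v == "Ye" || v == "Yes" || v == "On"

-- 'for valor in …: if valor: acc += 1 else: break'
def pvLoopA (acc : Int) : List Bool → Int
  | [] => acc
  | b :: t => if b then pvLoopA (acc + 1) t else acc

def contar_quintaesencia_y_paradoja (campos : List (String × List (String × String))) : List (String × Int) :=
  let checks := (PySem.List.pyRange 1 21 1).map (fun i => "qpcheck" ++ PySem.Int.toStr i)
  let valores := checks.map (fun check => pvChecked campos check)
  let quintaesencia := pvLoopA 0 valores
  let paradoja := pvLoopA 0 valores.reverse
  [("quintessence_dots", quintaesencia), ("paradox_dots", paradoja)]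

-- ===== PORT B =====
-- one step of B's for-loop: state = (quintaesencia, frozen, paradoja)
def pvStepB (s : Int × Bool × Int) (b : Bool) : Int × Bool × Int :=
  if b then (s.1 + (if s.2.1 then 0 else 1), s.2.1, s.2.2 + 1) else (s.1, true, 0)

def contar_quintaesencia_y_paradoja_alt (campos : List (String × List (String × String))) : List (String × Int) :=
  let s := (PySem.List.pyRange 1 21 1).foldl
    (fun s i => pvStepB s (pvChecked campos ("qpcheck" ++ PySem.Int.toStr i)))
    ((0 : Int), false, (0 : Int))
  [("quintessence_dots", s.1), ("paradox_dots", s.2.2)]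

-- ===== PRECONDITION & SPEC =====
def Spec_contar_quintaesencia_y_paradoja (campos : List (String × List (String × String))) (out : List (String × Int)) : Prop := out = contar_quintaesencia_y_paradoja_alt campos
instance (campos : List (String × List (String × String))) (out : List (String × Int)) : Decidable (Spec_contar_quintaesencia_y_paradoja campos out) := by unfold Spec_contar_quintaesencia_y_paradoja; infer_instance

-- ===== CLAIM =====
def Claim_equal_contar_quintaesencia_y_paradoja : Prop := ∀ (campos : List (String × List (String × String))), Dom_contar_quintaesencia_y_paradoja campos → Spec_contar_quintaesencia_y_paradoja campos (contar_quintaesencia_y_paradoja campos)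

-- ===== LEMMAS AND PROOFS =====
theorem pvLoopA_append_of_contains (l1 l2 : List Bool) (acc : Int)
    (h : l1.contains false = true) : pvLoopA acc (l1 ++ l2) = pvLoopA acc l1 := by
  induction l1 generalizing acc with
  | nil => simp at h
  | cons b t ih =>
    cases b with
    | false => simp [pvLoopA]
    | true =>
      have h' : t.contains false = true := by simpa using h
      simp [pvLoopA, ih _ h']

theorem pvLoopA_cons_true (t : List Bool) (acc : Int) :
    pvLoopA acc (true :: t) = pvLoopA (acc + 1) t := by simp [pvLoopA]

theorem pvLoopA_append_of_not_contains (l1 l2 : List Bool) (acc : Int)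
    (h : l1.contains false = false) :
    pvLoopA acc (l1 ++ l2) = pvLoopA (acc + l1.length) l2 := by
  induction l1 generalizing acc with
  | nil => simp
  | cons b t ih =>
    cases b with
    | false => simp at h
    | true =>
      have h' : t.contains false = false := by simpa using h
      rw [List.cons_append, pvLoopA_cons_true, ih _ h']
      congr 1
      simp only [List.length_cons]
      push_cast
      ring

theorem pvLoopA_zero_of_not_contains (l : List Bool) (acc : Int)
    (h : l.contains false = false) : pvLoopA acc l = acc + l.length := by
  have := pvLoopA_append_of_not_contains l [] acc h
  simpa [pvLoopA] using this

theorem pvLoopA_acc (l : List Bool) (acc : Int) :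
    pvLoopA acc l = acc + pvLoopA 0 l := by
  induction l generalizing acc with
  | nil => simp [pvLoopA]
  | cons b t ih =>
    cases b with
    | false => simp [pvLoopA]
    | true =>
      rw [pvLoopA_cons_true, pvLoopA_cons_true, ih (acc + 1), ih (0 + 1)]
      ring

-- the invariant of B's single pass, characterised by A's two break-scans
theorem foldB_eq (l : List Bool) (q : Int) (f : Bool) (p : Int) :
    l.foldl pvStepB (q, f, p) =
      (q + (if f then 0 else pvLoopA 0 l),
       f || l.contains false,
       if l.contains false then pvLoopA 0 l.reverse else p + l.length) := by
  induction l generalizing q f p with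
  | nil => cases f <;> simp [pvLoopA]
  | cons b t ih =>
    cases b with
    | false =>
      simp only [List.foldl_cons, pvStepB, if_neg (by decide : ¬ (false = true)), ih]
      have hl : pvLoopA 0 (false :: t) = 0 := by simp [pvLoopA]
      have hc : (false :: t).contains false = true := by simp
      rw [hl, hc]
      have hrev : pvLoopA 0 ((false :: t).reverse) =
          if t.contains false = true then pvLoopA 0 t.reverse else (0 : Int) + t.length := by
        simp only [List.reverse_cons]
        by_cases h : t.contains false = true
        · have : t.reverse.contains false = true := by simpa using h
          rw [pvLoopA_append_of_contains _ _ _ this, if_pos h]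
        · have h' : t.reverse.contains false = false := by
            simpa using (Bool.not_eq_true _).mp h
          rw [pvLoopA_append_of_not_contains _ _ _ h', if_neg h]
          simp [pvLoopA]
      rw [hrev]
      cases f <;> simp
    | true =>
      simp only [List.foldl_cons, pvStepB, ih]
      have hc : (true :: t).contains false = t.contains false := by simp
      have hl : pvLoopA 0 (true :: t) = 1 + pvLoopA 0 t := by
        rw [pvLoopA_cons_true]; rw [pvLoopA_acc]; ring
      have hrev : pvLoopA 0 ((true :: t).reverse) =
          if t.contains false = true then pvLoopA 0 t.reverse else (0 : Int) + (true :: t).length := by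
        simp only [List.reverse_cons]
        by_cases h : t.contains false = true
        · have : t.reverse.contains false = true := by simpa using h
          rw [pvLoopA_append_of_contains _ _ _ this, if_pos h]
        · have h' : t.reverse.contains false = false := by
            simpa using (Bool.not_eq_true _).mp h
          rw [pvLoopA_append_of_not_contains _ _ _ h', if_neg h]
          simp [pvLoopA]
      rw [hc, hl, hrev]
      cases f <;> by_cases h : t.contains false = true <;>
          simp only [h, if_pos, if_neg, Bool.false_eq_true, not_false_eq_true,
            List.length_cons] <;>
        refine Prod.ext ?_ (Prod.ext ?_ ?_) <;> simp <;> ring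

theorem contar_spec_aux (campos : List (String × List (String × String))) :
    contar_quintaesencia_y_paradoja campos = contar_quintaesencia_y_paradoja_alt campos := by
  simp only [contar_quintaesencia_y_paradoja, contar_quintaesencia_y_paradoja_alt,
    List.map_map, Function.comp_def, ← List.foldl_map
      (f := fun i => pvChecked campos ("qpcheck" ++ PySem.Int.toStr i)) (g := pvStepB)]
  set l := (PySem.List.pyRange 1 21 1).map
      (fun i => pvChecked campos ("qpcheck" ++ PySem.Int.toStr i)) with hl
  rw [foldB_eq]
  by_cases h : l.contains false = true
  · have hm : false ∈ l := by simpa using h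
    simp [hm]
  · have h' := (Bool.not_eq_true _).mp h
    have hrc : l.reverse.contains false = false := by simpa using h'
    rw [pvLoopA_zero_of_not_contains _ _ hrc]
    simp

-- ===== VERDICT =====
theorem contar_quintaesencia_y_paradoja_spec : Claim_equal_contar_quintaesencia_y_paradoja := by
  intro campos _
  unfold Spec_contar_quintaesencia_y_paradoja
  exact contar_spec_aux campos
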